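-- pv_equiv track=rewrite | github.com/myrzx/free-api-forwarder | src/modelscope_proxy.py | extract_quota_from_headers
-- ===== SOURCE A (Python) =====
-- from typing import Dict, Optional, List, Tuple
--
-- def extract_quota_from_headers(headers: Dict) -> Dict:
--     """从响应头提取配额信息"""
--     quota_info = {}
--
--     header_mapping = {
--         "modelscope-ratelimit-requests-limit": "user_limit",
--         "modelscope-ratelimit-requests-remaining": "user_remaining",
--         "modelscope-ratelimit-model-requests-limit": "model_limit",
--         "modelscope-ratelimit-model-requests-remaining": "model_remaining"
--     }
--
--     for header_name, key in header_mapping.items():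
--         if header_name.lower() in {k.lower() for k in headers}:
--             # 大小写不敏感查找
--             actual_key = next(k for k in headers if k.lower() == header_name.lower())
--             try:
--                 quota_info[key] = int(headers[actual_key])
--             except (ValueError, TypeError):
--                 quota_info[key] = None
--
--     return quota_info
-- ===== SOURCE B (Python) =====
-- def extract_quota_from_headers(headers):
--     """从响应头提取配额信息"""
--     header_mapping = {
--         "modelscope-ratelimit-requests-limit": "user_limit",
--         "modelscope-ratelimit-requests-remaining": "user_remaining",
--         "modelscope-ratelimit-model-requests-limit": "model_limit",
--         "modelscope-ratelimit-model-requests-remaining": "model_remaining"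
--     }
--
--     # single pass over the headers: classify each header by its lowercased name,
--     # first occurrence of a target wins
--     found = {}
--     for k, v in headers.items():
--         target = header_mapping.get(k.lower())
--         if target is not None and target not in found:
--             try:
--                 found[target] = int(v)
--             except (ValueError, TypeError):
--                 found[target] = None
--
--     # emit in header_mapping order, as A's mapping-driven loop does
--     return {t: found[t] for t in header_mapping.values() if t in found}
-- ===== Notes on version B (the rewrite author's own statement) =====
-- stated objective: faster
-- what changed: B inverts the iteration: instead of looping over the four target names and rescanning the whole header dict for each (set build + next() scan + indexed read), it makes a single pass over the headers, classifying each header by a mapping lookup on its lowercased name with first-occurrence-wins, then emits the collected entries in mapping order.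
import Mathlib
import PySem

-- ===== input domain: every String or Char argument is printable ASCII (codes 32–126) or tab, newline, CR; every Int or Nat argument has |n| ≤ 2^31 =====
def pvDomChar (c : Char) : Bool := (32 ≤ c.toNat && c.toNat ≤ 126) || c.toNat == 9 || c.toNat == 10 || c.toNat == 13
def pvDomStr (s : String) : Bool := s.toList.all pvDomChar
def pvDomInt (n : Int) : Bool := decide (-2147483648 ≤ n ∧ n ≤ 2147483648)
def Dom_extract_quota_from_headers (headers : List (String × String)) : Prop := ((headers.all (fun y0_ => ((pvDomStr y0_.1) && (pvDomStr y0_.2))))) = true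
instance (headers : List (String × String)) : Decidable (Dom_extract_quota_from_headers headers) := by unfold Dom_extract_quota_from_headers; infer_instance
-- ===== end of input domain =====

-- B inverts the iteration: one pass over the headers classifying each by a mapping lookup on its
-- lowercased name (first occurrence wins), then emits in mapping order — instead of A's per-target
-- rebuild of the lowercased key set plus rescan of the headers (objective: faster, constant factor).

-- the fixed header_mapping literal, shared by both Pythons
def pvHeaderMapping : List (String × String) :=
  [("modelscope-ratelimit-requests-limit", "user_limit"),
   ("modelscope-ratelimit-requests-remaining", "user_remaining"),
   ("modelscope-ratelimit-model-requests-limit", "model_limit"),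
   ("modelscope-ratelimit-model-requests-remaining", "model_remaining")]

-- ===== PORT A =====
def extract_quota_from_headers (headers : List (String × String)) : List (String × Option Int) :=
  (pvHeaderMapping.foldl (fun quota hk =>
    let hnl := PySem.Str.lower hk.1
    if hnl ∈ PySem.Set.ofList (headers.map (fun p => PySem.Str.lower p.1)) then
      -- actual_key = next(k for k in headers if k.lower() == header_name.lower())
      match headers.find? (fun p => PySem.Str.lower p.1 == hnl) with
      | some kv =>
        -- int(headers[actual_key]); (ValueError, TypeError) → None is ofStr? = none
        match headers.find? (fun p => p.1 == kv.1) with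
        | some p2 => quota.insert hk.2 (PySem.Int.ofStr? p2.2)
        | none => quota
      | none => quota
    else quota) PySem.Dict.empty).items

-- ===== PORT B =====
-- header_mapping.get(k.lower())
def pvMapGet (t : String) : Option String :=
  (pvHeaderMapping.find? (fun m => m.1 == t)).map Prod.snd

-- the single pass over the headers: first occurrence of each target wins
def pvFound (headers : List (String × String)) : PySem.Dict String (Option Int) :=
  headers.foldl (fun found p =>
    match pvMapGet (PySem.Str.lower p.1) with
    | some target =>
      if found.contains target then found
      else found.insert target (PySem.Int.ofStr? p.2)
    | none => found) PySem.Dict.empty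

def extract_quota_from_headers_alt (headers : List (String × String)) : List (String × Option Int) :=
  let found := pvFound headers
  -- {t: found[t] for t in header_mapping.values() if t in found}
  pvHeaderMapping.filterMap (fun m => (found.get? m.2).map (fun v => (m.2, v)))

-- ===== PRECONDITION & SPEC =====
def Spec_extract_quota_from_headers (headers : List (String × String)) (out : List (String × Option Int)) : Prop := out = extract_quota_from_headers_alt headers
instance (headers : List (String × String)) (out : List (String × Option Int)) : Decidable (Spec_extract_quota_from_headers headers out) := by unfold Spec_extract_quota_from_headers; infer_instance

-- ===== CLAIM (what is proved, stated in full; the proofs are below) =====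
def Claim_equal_extract_quota_from_headers : Prop := ∀ (headers : List (String × String)), Dom_extract_quota_from_headers headers → Spec_extract_quota_from_headers headers (extract_quota_from_headers headers)

-- ===== LEMMAS AND PROOFS =====

-- B's accumulator: a lookup in `found` is the first header classified to that target
theorem pvFound_get? (headers : List (String × String)) (s : String) :
    (pvFound headers).get? s
      = (headers.find? (fun p => pvMapGet (PySem.Str.lower p.1) == some s)).map
          (fun p => PySem.Int.ofStr? p.2) := by
  have main : ∀ (l : List (String × String)) (d : PySem.Dict String (Option Int)),
      (l.foldl (fun found p =>
        match pvMapGet (PySem.Str.lower p.1) with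
        | some target =>
          if found.contains target then found
          else found.insert target (PySem.Int.ofStr? p.2)
        | none => found) d).get? s
        = (d.get? s).or ((l.find? (fun p => pvMapGet (PySem.Str.lower p.1) == some s)).map
            (fun p => PySem.Int.ofStr? p.2)) := by
    intro l
    induction l with
    | nil => intro d; simp
    | cons p t ih =>
      intro d
      rw [List.foldl_cons, ih]
      rcases hm : pvMapGet (PySem.Str.lower p.1) with _ | target
      · dsimp only
        rw [List.find?_cons_of_neg (by simp [hm])]
      · dsimp only
        by_cases hts : target = s
        · subst hts
          rw [List.find?_cons_of_pos (by simp [hm])]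
          by_cases hd : d.contains target
          · rw [if_pos hd]
            rcases h : d.get? target with _ | v
            · rw [PySem.Dict.contains_eq_isSome_get?, h] at hd; simp at hd
            · simp
          · rw [if_neg hd]
            have hn : d.get? target = none := by
              rcases h : d.get? target with _ | v
              · rfl
              · rw [PySem.Dict.contains_eq_isSome_get?, h] at hd; simp at hd
            simp [PySem.Dict.get?_insert_self, hn]
        · rw [List.find?_cons_of_neg (by simp [hm, hts])]
          by_cases hd : d.contains target
          · rw [if_pos hd]
          · rw [if_neg hd, PySem.Dict.get?_insert_of_ne _ _ (fun h => hts h.symm)]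
  simpa [PySem.Dict.get?_empty] using main headers PySem.Dict.empty

-- the exact-key re-lookup of A returns the pair the case-insensitive scan found
theorem pvFind_exact (headers : List (String × String)) (s : String)
    (kv : String × String)
    (h : headers.find? (fun p => PySem.Str.lower p.1 == s) = some kv) :
    headers.find? (fun p => p.1 == kv.1) = some kv := by
  induction headers with
  | nil => simp at h
  | cons p t ih =>
    by_cases hc : PySem.Str.lower p.1 = s
    · rw [List.find?_cons_of_pos (by simp [hc])] at h
      cases h
      rw [List.find?_cons_of_pos (by simp)]
    · rw [List.find?_cons_of_neg (by simp [hc])] at h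
      have hkv : PySem.Str.lower kv.1 = s := by simpa using List.find?_some h
      have hne : p.1 ≠ kv.1 := fun he => hc (by rw [he, hkv])
      rw [List.find?_cons_of_neg (by simp [hne])]
      exact ih h

-- membership in the lowered-key set is success of the case-insensitive scan
theorem pvMem_iff_find (headers : List (String × String)) (s : String) :
    (s ∈ PySem.Set.ofList (headers.map (fun p => PySem.Str.lower p.1)))
      ↔ (headers.find? (fun p => PySem.Str.lower p.1 == s)).isSome := by
  rw [PySem.Set.mem_ofList, List.find?_isSome]
  simp only [List.mem_map]
  constructor
  · rintro ⟨p, hp, he⟩; exact ⟨p, hp, by simp [he]⟩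
  · rintro ⟨p, hp, he⟩; exact ⟨p, hp, by simpa using he⟩

-- classification by the mapping succeeds with value v iff the lowered name IS that target's
-- (exact) lowercase header name — one lemma per literal pair of the mapping
theorem pvMapGet_none (t : String)
    (h1 : t ≠ "modelscope-ratelimit-requests-limit")
    (h2 : t ≠ "modelscope-ratelimit-requests-remaining")
    (h3 : t ≠ "modelscope-ratelimit-model-requests-limit")
    (h4 : t ≠ "modelscope-ratelimit-model-requests-remaining") :
    pvMapGet t = none := by
  unfold pvMapGet pvHeaderMapping
  rw [List.find?_cons_of_neg (by simpa using Ne.symm h1),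
      List.find?_cons_of_neg (by simpa using Ne.symm h2),
      List.find?_cons_of_neg (by simpa using Ne.symm h3),
      List.find?_cons_of_neg (by simpa using Ne.symm h4)]
  rfl

theorem pvMapGet_eq (t k v : String) (hkv : (k, v) ∈ pvHeaderMapping) :
    (pvMapGet t == some v) = (t == k) := by
  by_cases h1 : t = "modelscope-ratelimit-requests-limit"
  · subst h1; fin_cases hkv <;> decide
  by_cases h2 : t = "modelscope-ratelimit-requests-remaining"
  · subst h2; fin_cases hkv <;> decide
  by_cases h3 : t = "modelscope-ratelimit-model-requests-limit"
  · subst h3; fin_cases hkv <;> decide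
  by_cases h4 : t = "modelscope-ratelimit-model-requests-remaining"
  · subst h4; fin_cases hkv <;> decide
  rw [pvMapGet_none t h1 h2 h3 h4]
  fin_cases hkv <;> simp_all

-- find?-predicate rewrite used four times below
theorem pvFind_pred (headers : List (String × String)) (k v : String)
    (hkv : (k, v) ∈ pvHeaderMapping) :
    headers.find? (fun p => pvMapGet (PySem.Str.lower p.1) == some v)
      = headers.find? (fun p => PySem.Str.lower p.1 == k) := by
  induction headers with
  | nil => rfl
  | cons p t ih =>
    rw [List.find?_cons, List.find?_cons, pvMapGet_eq _ _ _ hkv, ih]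

-- ===== VERDICT (by name: the statement is the Claim_ definition above) =====
theorem extract_quota_from_headers_spec : Claim_equal_extract_quota_from_headers := by
  unfold Claim_equal_extract_quota_from_headers
  intro headers _
  unfold Spec_extract_quota_from_headers extract_quota_from_headers extract_quota_from_headers_alt
  -- the four case-insensitive scans, one per target
  have key : ∀ (k v : String), (k, v) ∈ pvHeaderMapping → PySem.Str.lower k = k := by
    intro k v h; fin_cases h <;> decide
  have reduce : ∀ (k v : String), (k, v) ∈ pvHeaderMapping →
      ((pvFound headers).get? v).map (fun w => (v, w))
        = (headers.find? (fun p => PySem.Str.lower p.1 == k)).map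
            (fun p => (v, PySem.Int.ofStr? p.2)) := by
    intro k v hkv
    rw [pvFound_get?, pvFind_pred headers k v hkv, Option.map_map]
    rfl
  have stepA : ∀ (quota : PySem.Dict String (Option Int)) (k v : String),
      (k, v) ∈ pvHeaderMapping →
      (let hnl := PySem.Str.lower k
       if hnl ∈ PySem.Set.ofList (headers.map (fun p => PySem.Str.lower p.1)) then
         match headers.find? (fun p => PySem.Str.lower p.1 == hnl) with
         | some kv =>
           match headers.find? (fun p => p.1 == kv.1) with
           | some p2 => quota.insert v (PySem.Int.ofStr? p2.2)
           | none => quota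
         | none => quota
       else quota)
      = (match headers.find? (fun p => PySem.Str.lower p.1 == k) with
         | some p2 => quota.insert v (PySem.Int.ofStr? p2.2)
         | none => quota) := by
    intro quota k v hkv
    rw [show PySem.Str.lower k = k from key k v hkv]
    rcases hf : headers.find? (fun p => PySem.Str.lower p.1 == k) with _ | kv
    · have : ¬ (k ∈ PySem.Set.ofList (headers.map (fun p => PySem.Str.lower p.1))) := by
        rw [pvMem_iff_find, hf]; simp
      simp [this, hf]
    · have hmem : k ∈ PySem.Set.ofList (headers.map (fun p => PySem.Str.lower p.1)) := by
        rw [pvMem_iff_find, hf]; rfl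
      simp only [hmem, if_pos, hf, pvFind_exact headers _ kv hf]
  -- unfold the 4-entry mapping on both sides and case on the four scans
  have m1 : (("modelscope-ratelimit-requests-limit" : String), ("user_limit" : String)) ∈ pvHeaderMapping := by decide
  have m2 : (("modelscope-ratelimit-requests-remaining" : String), ("user_remaining" : String)) ∈ pvHeaderMapping := by decide
  have m3 : (("modelscope-ratelimit-model-requests-limit" : String), ("model_limit" : String)) ∈ pvHeaderMapping := by decide
  have m4 : (("modelscope-ratelimit-model-requests-remaining" : String), ("model_remaining" : String)) ∈ pvHeaderMapping := by decide
  show (pvHeaderMapping.foldl _ PySem.Dict.empty).items = _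
  rw [show pvHeaderMapping =
    [("modelscope-ratelimit-requests-limit", "user_limit"),
     ("modelscope-ratelimit-requests-remaining", "user_remaining"),
     ("modelscope-ratelimit-model-requests-limit", "model_limit"),
     ("modelscope-ratelimit-model-requests-remaining", "model_remaining")] from rfl]
  simp only [List.foldl_cons, List.foldl_nil, List.filterMap_cons, List.filterMap_nil]
  rw [stepA _ _ _ m1, stepA _ _ _ m2, stepA _ _ _ m3, stepA _ _ _ m4,
      reduce _ _ m1, reduce _ _ m2, reduce _ _ m3, reduce _ _ m4]
  rcases hf1 : headers.find? (fun p => PySem.Str.lower p.1 == "modelscope-ratelimit-requests-limit") with _ | p1 <;>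
  rcases hf2 : headers.find? (fun p => PySem.Str.lower p.1 == "modelscope-ratelimit-requests-remaining") with _ | p2 <;>
  rcases hf3 : headers.find? (fun p => PySem.Str.lower p.1 == "modelscope-ratelimit-model-requests-limit") with _ | p3 <;>
  rcases hf4 : headers.find? (fun p => PySem.Str.lower p.1 == "modelscope-ratelimit-model-requests-remaining") with _ | p4 <;>
    simp [hf1, hf2, hf3, hf4, PySem.Dict.items_insert, PySem.Dict.contains_insert,
          PySem.Dict.empty]
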